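-- pv_equiv track=rewrite | github.com/nexty1982/prod-current | front-end/scripts/oca_saints_scraper.py | extract_rank_and_short
-- ===== SOURCE A (Python) =====
-- from typing import List, Dict, Tuple, Optional
--
-- def extract_rank_and_short(name: str) -> Tuple[Optional[str], Optional[str]]:
--     known_ranks = [
--         "Equal-to-the-Apostles",
--         "Holy Apostles of the Seventy",
--         "Venerable",
--         "Hieromartyr",
--         "Greatmartyr",
--         "Protomartyr",
--         "Martyrs",
--         "Martyr",
--         "Apostles",
--         "Apostle",
--         "Righteous",
--         "Confessor",
--         "Blessed",
--         "Saints",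
--         "Saint",
--         "Holy",
--     ]
--     name_stripped = name.strip()
--     lower = name_stripped.lower()
--     for rank in sorted(known_ranks, key=len, reverse=True):
--         rl = rank.lower()
--         if lower.startswith(rl + " "):
--             return rank, name_stripped[len(rank) + 1 :].strip()
--         if lower.startswith(rl + ":"):
--             return rank, name_stripped[len(rank) + 1 :].strip()
--     return None, name_stripped
-- ===== SOURCE B (Python) =====
-- from typing import List, Dict, Tuple, Optional
--
-- def extract_rank_and_short(name):
--     canon = {
--         "equal-to-the-apostles": "Equal-to-the-Apostles",
--         "holy apostles of the seventy": "Holy Apostles of the Seventy",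
--         "venerable": "Venerable",
--         "hieromartyr": "Hieromartyr",
--         "greatmartyr": "Greatmartyr",
--         "protomartyr": "Protomartyr",
--         "martyrs": "Martyrs",
--         "martyr": "Martyr",
--         "apostles": "Apostles",
--         "apostle": "Apostle",
--         "righteous": "Righteous",
--         "confessor": "Confessor",
--         "blessed": "Blessed",
--         "saints": "Saints",
--         "saint": "Saint",
--         "holy": "Holy",
--     }
--     s = name.strip()
--     low = s.lower()
--     for i in range(len(s) - 1, -1, -1):
--         if low[i] in " :":
--             rank = canon.get(low[:i])
--             if rank is not None:
--                 return rank, s[i + 1:].strip()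
--     return None, s
-- ===== Notes on version B (the rewrite author's own statement) =====
-- stated objective: alternative
-- what changed: Replaces A's longest-first linear scan over the sorted rank list (two startswith tests per rank) by a single lowercase-to-canonical dictionary built once and one descending scan over the delimiter positions of the stripped input, looking each candidate prefix up in the dictionary.
import Mathlib
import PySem

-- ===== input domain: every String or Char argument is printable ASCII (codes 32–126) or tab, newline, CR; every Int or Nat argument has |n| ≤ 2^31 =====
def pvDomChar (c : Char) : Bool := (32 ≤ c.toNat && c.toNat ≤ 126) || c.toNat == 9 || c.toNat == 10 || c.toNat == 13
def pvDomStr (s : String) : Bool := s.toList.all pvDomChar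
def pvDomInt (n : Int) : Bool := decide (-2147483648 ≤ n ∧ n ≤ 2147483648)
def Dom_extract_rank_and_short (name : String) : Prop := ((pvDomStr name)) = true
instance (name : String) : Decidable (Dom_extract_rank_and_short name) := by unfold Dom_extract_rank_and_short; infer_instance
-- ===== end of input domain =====

-- B replaces A's longest-first scan over the rank list by a single lowercase→canonical dictionary
-- and one descending scan over the delimiter positions of the input (alternative decomposition, same cost).

-- ===== PORT A =====
def pvKnownRanks : List String :=
  ["Equal-to-the-Apostles", "Holy Apostles of the Seventy", "Venerable", "Hieromartyr",
   "Greatmartyr", "Protomartyr", "Martyrs", "Martyr", "Apostles", "Apostle", "Righteous",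
   "Confessor", "Blessed", "Saints", "Saint", "Holy"]

-- the 'for rank in sorted(...)' loop with its early returns
def pvRankLoop (stripped lower : String) : List String → Option String × Option String
  | [] => (none, some stripped)
  | rank :: rest =>
    let rl := PySem.Str.lower rank
    if PySem.Str.startswith lower (rl ++ " ") then
      (some rank, some (PySem.Str.strip (PySem.Str.slice stripped (some ((PySem.Str.len rank : Int) + 1)) none)))
    else if PySem.Str.startswith lower (rl ++ ":") then
      (some rank, some (PySem.Str.strip (PySem.Str.slice stripped (some ((PySem.Str.len rank : Int) + 1)) none)))
    else pvRankLoop stripped lower rest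

def extract_rank_and_short (name : String) : Option String × Option String :=
  let name_stripped := PySem.Str.strip name
  let lower := PySem.Str.lower name_stripped
  pvRankLoop name_stripped lower (PySem.List.sorted pvKnownRanks (fun r => PySem.Str.len r) true)

-- ===== PORT B =====
-- canon = {r.lower(): r for r in known_ranks}
def pvCanon : PySem.Dict String String := PySem.Dict.ofList
  [("equal-to-the-apostles", "Equal-to-the-Apostles"),
   ("holy apostles of the seventy", "Holy Apostles of the Seventy"),
   ("venerable", "Venerable"), ("hieromartyr", "Hieromartyr"), ("greatmartyr", "Greatmartyr"),
   ("protomartyr", "Protomartyr"), ("martyrs", "Martyrs"), ("martyr", "Martyr"),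
   ("apostles", "Apostles"), ("apostle", "Apostle"), ("righteous", "Righteous"),
   ("confessor", "Confessor"), ("blessed", "Blessed"), ("saints", "Saints"),
   ("saint", "Saint"), ("holy", "Holy")]

-- 'for i in range(len(s)-1, -1, -1)' with its early return; fuel j+1 handles position i = j.
-- 'low[i] in " :"' is a one-character membership test, i.e. the char equals ' ' or ':'.
def pvPosLoop (s low : String) : Nat → Option String × Option String
  | 0 => (none, some s)
  | j + 1 =>
    match PySem.Str.pyGet? low (j : Int) with
    | some c =>
      if c == ' ' || c == ':' then
        match PySem.Dict.get? pvCanon (PySem.Str.slice low none (some (j : Int))) with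
        | some rank => (some rank, some (PySem.Str.strip (PySem.Str.slice s (some ((j : Int) + 1)) none)))
        | none => pvPosLoop s low j
      else pvPosLoop s low j
    | none => pvPosLoop s low j   -- unreachable: 0 ≤ j < len(low)

def extract_rank_and_short_alt (name : String) : Option String × Option String :=
  let s := PySem.Str.strip name
  let low := PySem.Str.lower s
  pvPosLoop s low (PySem.Str.len s).toNat

-- ===== PRECONDITION & SPEC =====
def Spec_extract_rank_and_short (name : String) (out : Option String × Option String) : Prop := out = extract_rank_and_short_alt name
instance (name : String) (out : Option String × Option String) : Decidable (Spec_extract_rank_and_short name out) := by unfold Spec_extract_rank_and_short; infer_instance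

-- ===== CLAIM (what is proved, stated in full; the proofs are below) =====
def Claim_equal_extract_rank_and_short : Prop := ∀ (name : String), Dom_extract_rank_and_short name → Spec_extract_rank_and_short name (extract_rank_and_short name)

-- ===== LEMMAS AND PROOFS =====

-- the condition tested for rank r by A's loop body (both branches)
def pvB (lower r : String) : Bool :=
  PySem.Str.startswith lower (PySem.Str.lower r ++ " ") || PySem.Str.startswith lower (PySem.Str.lower r ++ ":")

-- A's loop is first-match search with predicate pvB
lemma pvRankLoop_eq_find (s lower : String) (L : List String) :
    pvRankLoop s lower L =
      match L.find? (pvB lower) with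
      | some r => (some r, some (PySem.Str.strip (PySem.Str.slice s (some ((PySem.Str.len r : Int) + 1)) none)))
      | none => (none, some s) := by
  induction L with
  | nil => rfl
  | cons r rest ih =>
    simp only [pvRankLoop, List.find?_cons, pvB, PySem.Str.startswith_eq, String.toList_append,
      PySem.Str.toList_lower]
    by_cases h1 : PySem.Chars.startswith lower.toList (PySem.Chars.lower r.toList ++ [' ']) = true
    · simp [h1]
    · by_cases h2 : PySem.Chars.startswith lower.toList (PySem.Chars.lower r.toList ++ [':']) = true
      · simp [h1, h2]
      · simp [h1, h2, ih]

lemma prefix_snoc_iff (l p : List Char) (d : Char) :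
    p ++ [d] <+: l ↔ l.take p.length = p ∧ l[p.length]? = some d := by
  constructor
  · rintro ⟨t, rfl⟩
    refine ⟨?_, ?_⟩
    · simp
    · rw [List.append_assoc, List.getElem?_append_right (le_refl _)]
      simp
  · rintro ⟨h1, h2⟩
    have := List.take_add_one (l := l) (i := p.length)
    rw [h2] at this
    have hpre : l.take (p.length + 1) = p ++ [d] := by
      rw [this, h1]; rfl
    exact hpre ▸ List.take_prefix _ _

-- pvB in terms of the char list of lower
lemma pvB_iff (lower r : String) :
    pvB lower r = true ↔
      ∃ d, (d = ' ' ∨ d = ':') ∧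
        lower.toList.take (PySem.Chars.lower r.toList).length = PySem.Chars.lower r.toList ∧
        lower.toList[(PySem.Chars.lower r.toList).length]? = some d := by
  simp only [pvB, Bool.or_eq_true, PySem.Str.startswith_eq]
  rw [PySem.Chars.startswith_iff, PySem.Chars.startswith_iff]
  simp only [String.toList_append]
  constructor
  · rintro (h | h)
    · exact ⟨' ', Or.inl rfl, (prefix_snoc_iff _ _ _).mp (by simpa using h)⟩
    · exact ⟨':', Or.inr rfl, (prefix_snoc_iff _ _ _).mp (by simpa using h)⟩
  · rintro ⟨d, (rfl | rfl), h⟩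
    · exact Or.inl (by simpa using (prefix_snoc_iff _ _ _).mpr h)
    · exact Or.inr (by simpa using (prefix_snoc_iff _ _ _).mpr h)

lemma pvCanon_eq : pvCanon = PySem.Dict.mk
  [("equal-to-the-apostles", "Equal-to-the-Apostles"),
   ("holy apostles of the seventy", "Holy Apostles of the Seventy"),
   ("venerable", "Venerable"), ("hieromartyr", "Hieromartyr"), ("greatmartyr", "Greatmartyr"),
   ("protomartyr", "Protomartyr"), ("martyrs", "Martyrs"), ("martyr", "Martyr"),
   ("apostles", "Apostles"), ("apostle", "Apostle"), ("righteous", "Righteous"),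
   ("confessor", "Confessor"), ("blessed", "Blessed"), ("saints", "Saints"),
   ("saint", "Saint"), ("holy", "Holy")] := by decide

lemma dict_get?_mem {κ ν : Type} [BEq κ] [LawfulBEq κ] (items : List (κ × ν)) (k : κ) (v : ν)
    (h : (PySem.Dict.mk items).get? k = some v) : (k, v) ∈ items := by
  induction items with
  | nil => simp [PySem.Dict.get?] at h
  | cons p rest ih =>
    obtain ⟨k0, v0⟩ := p
    rw [PySem.Dict.get?_mk_cons] at h
    by_cases hk : (k0 == k) = true
    · rw [if_pos hk] at h
      injection h with h
      subst h
      obtain rfl := eq_of_beq hk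
      exact List.mem_cons_self
    · rw [if_neg hk] at h
      exact List.mem_cons_of_mem _ (ih h)

lemma canon_spec (k r : String) (h : PySem.Dict.get? pvCanon k = some r) :
    r ∈ pvKnownRanks ∧ k.toList = PySem.Chars.lower r.toList := by
  rw [pvCanon_eq] at h
  have hm := dict_get?_mem _ _ _ h
  simp only [List.mem_cons, List.not_mem_nil, or_false, Prod.mk.injEq] at hm
  rcases hm with ⟨rfl, rfl⟩|⟨rfl, rfl⟩|⟨rfl, rfl⟩|⟨rfl, rfl⟩|⟨rfl, rfl⟩|⟨rfl, rfl⟩|⟨rfl, rfl⟩|⟨rfl, rfl⟩|⟨rfl, rfl⟩|⟨rfl, rfl⟩|⟨rfl, rfl⟩|⟨rfl, rfl⟩|⟨rfl, rfl⟩|⟨rfl, rfl⟩|⟨rfl, rfl⟩|⟨rfl, rfl⟩ <;> exact ⟨by decide, by decide⟩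

lemma canon_lower (r : String) (hr : r ∈ pvKnownRanks) (k : String)
    (hk : k.toList = PySem.Chars.lower r.toList) : PySem.Dict.get? pvCanon k = some r := by
  have hks : k = String.ofList (PySem.Chars.lower r.toList) := String.toList_inj.mp (by simp [hk])
  subst hks
  fin_cases hr <;> decide

-- the key string B looks up at position j reads the first j chars of lower
lemma key_toList (low : String) (j : Nat) :
    (PySem.Str.slice low none (some (j : Int))).toList = low.toList.take j := by
  simp [PySem.Str.toList_slice, PySem.Chars.slice_eq_listSlice, PySem.List.slice_to_natCast]

-- "B's loop body fires at position j, returning rank r"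
def pvFire (low : String) (j : Nat) (r : String) : Prop :=
  (low.toList[j]? = some ' ' ∨ low.toList[j]? = some ':') ∧
    PySem.Dict.get? pvCanon (PySem.Str.slice low none (some (j : Int))) = some r

lemma fire_spec (low : String) (j : Nat) (r : String) (h : pvFire low j r) :
    r ∈ pvKnownRanks ∧ pvB low r = true ∧ r.toList.length = j := by
  obtain ⟨hd, hg⟩ := h
  obtain ⟨hmem, hkey⟩ := canon_spec _ _ hg
  rw [key_toList] at hkey
  have hjlt : j < low.toList.length := by
    rcases hd with hd | hd <;> exact (List.getElem?_eq_some_iff.mp hd).1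
  have hlen : (PySem.Chars.lower r.toList).length = j := by
    rw [← hkey, List.length_take]; omega
  refine ⟨hmem, ?_, ?_⟩
  · rw [pvB_iff]
    rcases hd with hd | hd
    · exact ⟨' ', Or.inl rfl, by rw [hlen, ← hkey], by rw [hlen]; exact hd⟩
    · exact ⟨':', Or.inr rfl, by rw [hlen, ← hkey], by rw [hlen]; exact hd⟩
  · simpa [PySem.Chars.lower] using hlen

lemma fire_of_match (low r : String) (hr : r ∈ pvKnownRanks) (hb : pvB low r = true) :
    pvFire low r.toList.length r := by
  rw [pvB_iff] at hb
  obtain ⟨d, hd, htake, hget⟩ := hb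
  have hlen : (PySem.Chars.lower r.toList).length = r.toList.length := by
    simp [PySem.Chars.lower]
  rw [hlen] at htake hget
  constructor
  · rcases hd with rfl | rfl
    · exact Or.inl hget
    · exact Or.inr hget
  · exact canon_lower r hr _ (by rw [key_toList, htake])

lemma posLoop_step (s low : String) (j : Nat) (hno : ∀ r, ¬ pvFire low j r) :
    pvPosLoop s low (j + 1) = pvPosLoop s low j := by
  simp only [pvPosLoop, PySem.Str.pyGet?_natCast]
  cases hg : low.toList[j]? with
  | none => rfl
  | some c =>
    by_cases hc : (c == ' ' || c == ':') = true
    · cases hget : PySem.Dict.get? pvCanon (PySem.Str.slice low none (some (j : Int))) with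
      | none => simp [hc]
      | some r =>
        refine absurd ⟨?_, hget⟩ (hno r)
        rcases Bool.or_eq_true_iff.mp hc with h | h
        · exact Or.inl (by rw [hg, beq_iff_eq.mp h])
        · exact Or.inr (by rw [hg, beq_iff_eq.mp h])
    · simp [hc]

lemma posLoop_none (s low : String) (hA : ∀ r ∈ pvKnownRanks, ¬ pvB low r = true) :
    ∀ j, pvPosLoop s low j = (none, some s) := by
  intro j
  induction j with
  | zero => rfl
  | succ j ih =>
    rw [posLoop_step s low j, ih]
    intro r hf
    obtain ⟨hmem, hb, _⟩ := fire_spec low j r hf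
    exact hA r hmem hb

lemma posLoop_hit (s low : String) (r : String) (hf : pvFire low r.toList.length r)
    (hmax : ∀ j r', r.toList.length < j → ¬ pvFire low j r') :
    ∀ j, r.toList.length < j →
      pvPosLoop s low j =
        (some r, some (PySem.Str.strip (PySem.Str.slice s (some ((r.toList.length : Int) + 1)) none))) := by
  intro j
  induction j with
  | zero => omega
  | succ j ih =>
    intro hj
    by_cases hjr : r.toList.length < j
    · rw [posLoop_step s low j (fun r' => hmax j r' hjr), ih hjr]
    · have hj' : j = r.toList.length := by omega
      subst hj'
      obtain ⟨hd, hget⟩ := hf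
      simp only [pvPosLoop, PySem.Str.pyGet?_natCast, String.length_toList] at hd hget ⊢
      rcases hd with hd | hd <;> rw [hd] <;> simp [hget]

lemma main_equiv (s low : String) (hlow : low = PySem.Str.lower s) :
    pvRankLoop s low (PySem.List.sorted pvKnownRanks (fun r => PySem.Str.len r) true) =
      pvPosLoop s low (PySem.Str.len s).toNat := by
  rw [pvRankLoop_eq_find]
  set L := PySem.List.sorted pvKnownRanks (fun r => PySem.Str.len r) true with hL
  have hmemL : ∀ r, r ∈ L ↔ r ∈ pvKnownRanks := fun r => by
    rw [hL]; exact PySem.List.mem_sorted _ _ _ _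
  have hfuel : (PySem.Str.len s).toNat = low.toList.length := by
    simp [PySem.Str.len_eq, hlow, PySem.Str.toList_lower, PySem.Chars.lower]
  cases hfind : L.find? (pvB low) with
  | none =>
    rw [hfuel, posLoop_none s low (fun r hr => by
      have := List.find?_eq_none.mp hfind r ((hmemL r).mpr hr)
      simpa using this)]
  | some r =>
    obtain ⟨hbr, as, bs, hsplit, hnot⟩ := List.find?_eq_some_iff_append.mp hfind
    have hrmem : r ∈ pvKnownRanks := (hmemL r).mp (hsplit ▸ List.mem_append_right as List.mem_cons_self)
    have hfire := fire_of_match low r hrmem hbr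
    have hpair : L.Pairwise (fun a b => PySem.Str.len b ≤ PySem.Str.len a) := by
      rw [hL]; exact PySem.List.sorted_pairwise_rev _ _
    have hmax : ∀ j r', r.toList.length < j → ¬ pvFire low j r' := by
      intro j r' hjgt hf'
      obtain ⟨hmem', hb', hlen'⟩ := fire_spec low j r' hf'
      -- r' matches and is longer than r, so r' would precede r in L, contradicting hnot
      have hr'L : r' ∈ as ++ r :: bs := hsplit ▸ (hmemL r').mpr hmem'
      rcases List.mem_append.mp hr'L with h | h
      · have := hnot r' h
        simp only [Bool.not_eq_eq_eq_not, Bool.not_true] at this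
        rw [this] at hb'
        exact Bool.false_ne_true hb'
      · rcases List.mem_cons.mp h with rfl | h
        · omega
        · have hle : PySem.Str.len r' ≤ PySem.Str.len r := by
            rw [hsplit] at hpair
            have := (List.pairwise_append.mp hpair).2.1
            exact (List.pairwise_cons.mp this).1 r' h
          simp only [PySem.Str.len_eq] at hle
          omega
    have hlt : r.toList.length < low.toList.length := by
      obtain ⟨hd, _⟩ := hfire
      rcases hd with hd | hd <;> exact (List.getElem?_eq_some_iff.mp hd).1
    rw [hfuel, posLoop_hit s low r hfire hmax low.toList.length hlt]
    simp [PySem.Str.len_eq]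

lemma key_equiv (name : String) : extract_rank_and_short name = extract_rank_and_short_alt name :=
  main_equiv (PySem.Str.strip name) (PySem.Str.lower (PySem.Str.strip name)) rfl

-- ===== VERDICT (by name: the statement is the Claim_ definition above) =====
theorem extract_rank_and_short_spec : Claim_equal_extract_rank_and_short := by
  intro name _
  unfold Spec_extract_rank_and_short
  exact key_equiv name
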